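-- pv_equiv track=rewrite | github.com/Iris-ZJ-12/NLP | search_image/pharm_ai/util/mt5_ner.py | combine_cut_entities
-- ===== SOURCE A (Python) =====
-- def combine_cut_entities(cut_entities: list, cut_ids: list):
--     dic = dict()
--     for i, j in zip(cut_ids, cut_entities):
--         if i not in dic.keys():
--             dic[i] = j
--         else:
--             if isinstance(j, str):
--                 dic[i] = dic[i] + '|' + j
--             else:
--                 dic[i].update(j)
--     return dic
-- ===== SOURCE B (Python) =====
-- def combine_cut_entities(cut_entities: list, cut_ids: list):
--     # Pass 1: group the values by id, preserving first-occurrence order.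
--     groups = {}
--     for i, j in zip(cut_ids, cut_entities):
--         groups.setdefault(i, []).append(j)
--     # Pass 2: fold each group, using its first element as the accumulator
--     # (so a dict first-element is mutated in place, exactly like A).
--     dic = {}
--     for i, vs in groups.items():
--         acc = vs[0]
--         for j in vs[1:]:
--             if isinstance(j, str):
--                 acc = acc + '|' + j
--             else:
--                 acc.update(j)
--         dic[i] = acc
--     return dic
-- ===== Notes on version B (the rewrite author's own statement) =====
-- stated objective: alternative
-- what changed: B first groups values into id -> list with setdefault/append in one pass, then in a second pass folds each group into the joined value, instead of A's single pass that looks up and rewrites the dict entry at every element.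
import Mathlib
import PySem

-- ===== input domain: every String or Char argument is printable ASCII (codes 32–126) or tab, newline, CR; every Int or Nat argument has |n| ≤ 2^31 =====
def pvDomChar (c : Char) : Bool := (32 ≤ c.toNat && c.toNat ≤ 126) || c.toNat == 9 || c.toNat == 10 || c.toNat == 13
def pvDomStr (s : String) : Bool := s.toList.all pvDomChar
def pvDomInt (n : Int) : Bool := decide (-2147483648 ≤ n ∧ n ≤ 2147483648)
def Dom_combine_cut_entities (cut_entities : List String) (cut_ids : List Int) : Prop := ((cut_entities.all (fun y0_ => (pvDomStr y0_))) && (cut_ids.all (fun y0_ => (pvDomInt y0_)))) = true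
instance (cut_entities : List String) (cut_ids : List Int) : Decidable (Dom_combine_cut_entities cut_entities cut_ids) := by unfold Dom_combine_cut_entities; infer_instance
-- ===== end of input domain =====

-- B regroups the work into two passes (group by id, then fold each group); same result as A, no speed claim.

-- ===== PORT A =====
-- Literal port of A.  Under the type convention cut_entities : List String, so the
-- `isinstance(j, str)` test is always true and only the string branch is reachable.
def combine_cut_entities (cut_entities : List String) (cut_ids : List Int) : List (Int × String) :=
  let dic := (List.zip cut_ids cut_entities).foldl
    (fun d p =>
      if d.contains p.1 = false then d.insert p.1 p.2
      else d.insert p.1 (d.getD p.1 "" ++ "|" ++ p.2))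
    PySem.Dict.empty
  dic.items

-- ===== PORT B =====
-- Fold of one group: `acc = vs[0]; for j in vs[1:]: acc = acc + '|' + j`.
-- In Source B the values are always strings, so only the str branch is reachable.
-- The [] case is unreachable (every group is created non-empty); "" stands for it.
def pvJoinGroup (vs : List String) : String :=
  match vs with
  | [] => ""
  | h :: t => t.foldl (fun acc j => acc ++ "|" ++ j) h

def combine_cut_entities_alt (cut_entities : List String) (cut_ids : List Int) : List (Int × String) :=
  let groups := (List.zip cut_ids cut_entities).foldl
    (fun d p => d.modify p.1 [] (· ++ [p.2])) PySem.Dict.empty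
  let dic := groups.items.foldl
    (fun d p => d.insert p.1 (pvJoinGroup p.2)) PySem.Dict.empty
  dic.items

-- ===== PRECONDITION & SPEC =====
def Spec_combine_cut_entities (cut_entities : List String) (cut_ids : List Int) (out : List (Int × String)) : Prop := out = combine_cut_entities_alt cut_entities cut_ids
instance (cut_entities : List String) (cut_ids : List Int) (out : List (Int × String)) : Decidable (Spec_combine_cut_entities cut_entities cut_ids out) := by unfold Spec_combine_cut_entities; infer_instance

-- ===== CLAIM (what is proved, stated in full; the proofs are below) =====
def Claim_equal_combine_cut_entities : Prop := ∀ (cut_entities : List String) (cut_ids : List Int), Dom_combine_cut_entities cut_entities cut_ids → Spec_combine_cut_entities cut_entities cut_ids (combine_cut_entities cut_entities cut_ids)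

-- ===== LEMMAS AND PROOFS =====

-- "extend an optional accumulator by one value": none ↦ the value, some s ↦ s|j.
def pvExt (o : Option String) (j : String) : Option String :=
  some (match o with | none => j | some s => s ++ "|" ++ j)

-- A's loop body, named for rewriting.
def pvStepA (d : PySem.Dict Int String) (p : Int × String) : PySem.Dict Int String :=
  if d.contains p.1 = false then d.insert p.1 p.2
  else d.insert p.1 (d.getD p.1 "" ++ "|" ++ p.2)

theorem pvStepA_eq_insert :
    pvStepA = fun d p => d.insert p.1
      (if d.contains p.1 = false then p.2 else d.getD p.1 "" ++ "|" ++ p.2) := by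
  funext d p
  by_cases h : d.contains p.1 = false <;> simp [pvStepA, h]

theorem pvA_get? (l : List (Int × String)) :
    ∀ (d : PySem.Dict Int String) (c : Int),
      (l.foldl pvStepA d).get? c
        = ((l.filter (fun p => p.1 == c)).map (·.2)).foldl pvExt (d.get? c) := by
  induction l with
  | nil => intro d c; simp
  | cons p t ih =>
    intro d c
    by_cases hc : p.1 = c
    · subst hc
      have hstep : (pvStepA d p).get? p.1 = pvExt (d.get? p.1) p.2 := by
        rcases hdo : d.get? p.1 with _ | s
        · have : d.contains p.1 = false := by
            rw [PySem.Dict.contains_eq_isSome_get?, hdo]; rfl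
          simp [pvStepA, this, PySem.Dict.get?_insert_self, pvExt]
        · have hcon : d.contains p.1 = true := by
            rw [PySem.Dict.contains_eq_isSome_get?, hdo]; rfl
          have hgd : d.getD p.1 "" = s := by
            rw [PySem.Dict.getD_eq_get?_getD, hdo]; rfl
          simp [pvStepA, hcon, PySem.Dict.get?_insert_self, pvExt, hgd]
      simp only [List.foldl_cons, List.filter_cons, beq_self_eq_true, if_pos, List.map_cons,
        ih (pvStepA d p), hstep]
    · have hne : (p.1 == c) = false := by simp [hc]
      have hstep : (pvStepA d p).get? c = d.get? c := by
        rw [pvStepA_eq_insert]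
        rw [PySem.Dict.get?_insert]
        rw [if_neg (fun h => hc (Eq.symm h))]
      simp only [List.foldl_cons, List.filter_cons, hne, ih (pvStepA d p), hstep]
      simp

theorem pvFoldExt_some (t : List String) :
    ∀ s, t.foldl pvExt (some s) = some (t.foldl (fun acc j => acc ++ "|" ++ j) s) := by
  induction t with
  | nil => intro s; rfl
  | cons j t ih => intro s; simpa [pvExt] using ih (s ++ "|" ++ j)

theorem pvFoldExt_join (vs : List String) :
    (vs.foldl pvExt none).getD "" = pvJoinGroup vs := by
  cases vs with
  | nil => rfl
  | cons h t => simp [pvExt, pvFoldExt_some, pvJoinGroup]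

theorem pvA_getD (l : List (Int × String)) (c : Int) :
    (l.foldl pvStepA PySem.Dict.empty).getD c ""
      = pvJoinGroup ((l.filter (fun p => p.1 == c)).map (·.2)) := by
  rw [PySem.Dict.getD_eq_get?_getD, pvA_get?, PySem.Dict.get?_empty, pvFoldExt_join]

theorem combine_cut_entities_spec : Claim_equal_combine_cut_entities := by
  intro cut_entities cut_ids _
  unfold Spec_combine_cut_entities combine_cut_entities combine_cut_entities_alt
  set l := List.zip cut_ids cut_entities with hl
  -- name the two dicts
  show (l.foldl _ PySem.Dict.empty).items = _
  have hA : (l.foldl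
      (fun d p =>
        if d.contains p.1 = false then d.insert p.1 p.2
        else d.insert p.1 (d.getD p.1 "" ++ "|" ++ p.2)) PySem.Dict.empty)
      = l.foldl pvStepA PySem.Dict.empty := rfl
  rw [hA]
  set dA := l.foldl pvStepA PySem.Dict.empty with hdA
  set groups := l.foldl (fun d p => d.modify p.1 [] (· ++ [p.2])) PySem.Dict.empty with hg
  -- keys coincide
  have hkA : dA.keys = PySem.Set.update (PySem.Dict.empty : PySem.Dict Int String).keys (l.map (·.1)) := by
    rw [hdA, pvStepA_eq_insert]
    exact PySem.Dict.keys_foldl_insert_key l (·.1) _ _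
  have hkB : groups.keys = PySem.Set.update (PySem.Dict.empty : PySem.Dict Int (List String)).keys (l.map (·.1)) := by
    rw [hg]
    exact PySem.Dict.keys_foldl_modify_key l (·.1) _ _ _
  have hnA : dA.keys.Nodup := by
    rw [hdA, pvStepA_eq_insert]
    exact PySem.Dict.nodup_keys_foldl_insert_key l (·.1) _ _ PySem.Dict.nodup_keys_empty
  have hnB : groups.keys.Nodup := by
    rw [hg]
    exact PySem.Dict.nodup_keys_foldl_modify_key l (·.1) _ _ _ PySem.Dict.nodup_keys_empty
  -- B's second loop inserts distinct fresh keys, so it just lists the mapped items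
  have hfresh : ∀ p ∈ groups.items, (PySem.Dict.empty : PySem.Dict Int String).contains p.1 = false := by
    intro p _; exact PySem.Dict.contains_empty _
  have hmapnodup : (groups.items.map (·.1)).Nodup := hnB
  have hBitems :
      (groups.items.foldl (fun d p => d.insert p.1 (pvJoinGroup p.2)) PySem.Dict.empty).items
        = groups.items.map (fun p => (p.1, pvJoinGroup p.2)) := by
    simpa using PySem.Dict.items_foldl_insert_fresh groups.items (·.1) (fun p => pvJoinGroup p.2)
      PySem.Dict.empty hfresh hmapnodup
  rw [hBitems]
  -- both sides as maps over the (equal) key lists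
  rw [PySem.Dict.items_eq_map_keys dA hnA ""]
  rw [PySem.Dict.items_eq_map_keys groups hnB []]
  rw [List.map_map, hkA, hkB]
  apply List.map_congr_left
  intro k _
  have hBv : groups.getD k [] = (l.filter (fun p => p.1 == k)).map (·.2) := by
    rw [hg]
    simpa using PySem.Dict.getD_foldl_modify_append l PySem.Dict.empty k
  simp only [Function.comp, hBv, hdA, pvA_getD]
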